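-- pv_equiv track=rewrite | github.com/aseppa20/advent_of_code_2022 | Day 8/grid.py | scanToInsertMinusOneLeftToRight
-- ===== SOURCE A (Python) =====
-- def scanToInsertMinusOneLeftToRight(row) -> list:
--
--     currentMax = -1
--
--     for index, num in enumerate(row):
--         if num > currentMax:
--             currentMax = num
--         else:
--             row[index] = -1
--
--     return row
-- ===== SOURCE B (Python) =====
-- def scanToInsertMinusOneLeftToRight(row) -> list:
--     # two passes: build prefix-maximum table from original values, then apply
--     pm = -1
--     prefix = []
--     for v in row:
--         prefix.append(pm)
--         if v > pm:
--             pm = v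
--     row[:] = [-1 if v <= p else v for v, p in zip(row, prefix)]
--     return row
-- ===== Notes on version B (the rewrite author's own statement) =====
-- stated objective: alternative
-- what changed: replaces the single interleaved running-max-and-mutate scan with a two-pass decomposition: first build a prefix-maximum table from the original values, then rewrite the row in one comprehension comparing each element with its prefix maximum
import Mathlib
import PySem

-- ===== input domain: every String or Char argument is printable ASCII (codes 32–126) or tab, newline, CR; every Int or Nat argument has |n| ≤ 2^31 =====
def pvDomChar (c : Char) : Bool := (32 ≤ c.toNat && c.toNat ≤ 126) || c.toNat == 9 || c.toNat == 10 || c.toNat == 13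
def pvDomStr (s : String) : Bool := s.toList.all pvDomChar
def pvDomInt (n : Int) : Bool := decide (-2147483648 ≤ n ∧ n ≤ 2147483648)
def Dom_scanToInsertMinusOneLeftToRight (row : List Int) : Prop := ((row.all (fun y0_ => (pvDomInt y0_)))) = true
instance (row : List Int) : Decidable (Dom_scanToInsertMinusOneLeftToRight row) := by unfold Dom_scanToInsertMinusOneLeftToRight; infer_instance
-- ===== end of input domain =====

-- B replaces A's interleaved running-max-and-mutate scan with a two-pass decomposition
-- (prefix-maximum table, then one rewrite pass); equivalence about the return value
-- (both Pythons also mutate `row` in place identically).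

-- ===== PORT A =====
-- one fold over enumerate(row), state = (currentMax, row); row[index] = -1 via pySetD
def scanToInsertMinusOneLeftToRight (row : List Int) : List Int :=
  ((PySem.List.enumerate row 0).foldl
    (fun (st : Int × List Int) (p : Int × Int) =>
      if p.2 > st.1 then (p.2, st.2)
      else (st.1, PySem.List.pySetD st.2 p.1 (-1)))
    (-1, row)).2

-- ===== PORT B =====
-- pass 1: fold building (pm, prefix); pass 2: zipWith for the comprehension over zip(row, prefix)
def scanToInsertMinusOneLeftToRight_alt (row : List Int) : List Int :=
  let pr := (row.foldl
    (fun (st : Int × List Int) v =>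
      (if v > st.1 then v else st.1, st.2 ++ [st.1]))
    (-1, ([] : List Int))).2
  List.zipWith (fun v p => if v ≤ p then -1 else v) row pr

-- ===== PRECONDITION & SPEC =====
def Spec_scanToInsertMinusOneLeftToRight (row : List Int) (out : List Int) : Prop :=
  out = scanToInsertMinusOneLeftToRight_alt row
instance (row : List Int) (out : List Int) : Decidable (Spec_scanToInsertMinusOneLeftToRight row out) := by
  unfold Spec_scanToInsertMinusOneLeftToRight; infer_instance

-- ===== CLAIM =====
def Claim_equal_scanToInsertMinusOneLeftToRight : Prop :=
  ∀ (row : List Int), Dom_scanToInsertMinusOneLeftToRight row →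
    Spec_scanToInsertMinusOneLeftToRight row (scanToInsertMinusOneLeftToRight row)

-- ===== LEMMAS AND PROOFS =====

-- common specification: keep a new strict maximum, replace everything else by -1
def pvGo (cm : Int) : List Int → List Int
  | [] => []
  | v :: t => if v > cm then v :: pvGo v t else (-1) :: pvGo cm t

-- the prefix-maximum table B builds
def pvPref (cm : Int) : List Int → List Int
  | [] => []
  | v :: t => cm :: pvPref (if v > cm then v else cm) t

theorem pvSet_mid (done t : List Int) (v w : Int) :
    (done ++ v :: t).set done.length w = done ++ w :: t := by
  induction done with
  | nil => simp
  | cons d ds ih => simp [ih]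

theorem pvFoldA (t : List Int) : ∀ (cm : Int) (done : List Int),
    ((PySem.List.enumerate t (done.length : Int)).foldl
      (fun (st : Int × List Int) (p : Int × Int) =>
        if p.2 > st.1 then (p.2, st.2)
        else (st.1, PySem.List.pySetD st.2 p.1 (-1)))
      (cm, done ++ t)).2 = done ++ pvGo cm t := by
  induction t with
  | nil => intro cm done; simp [PySem.List.enumerate_nil, pvGo]
  | cons v t ih =>
    intro cm done
    rw [PySem.List.enumerate_cons]
    simp only [List.foldl_cons]
    by_cases h : v > cm
    · have h1 : (done.length : Int) + 1 = ((done ++ [v]).length : Int) := by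
        simp
      have h2 : done ++ v :: t = (done ++ [v]) ++ t := by simp
      simp only [if_pos h]
      rw [h2, h1, ih v (done ++ [v])]
      simp [pvGo, h]
    · simp only [if_neg h]
      have hset : PySem.List.pySetD (done ++ v :: t) ((done.length : Int)) (-1)
          = done ++ (-1) :: t := by
        rw [PySem.List.pySetD_natCast, pvSet_mid]
      have h1 : (done.length : Int) + 1 = ((done ++ [(-1 : Int)]).length : Int) := by
        simp
      have h2 : done ++ (-1) :: t = (done ++ [(-1 : Int)]) ++ t := by simp
      rw [hset, h2, h1, ih cm (done ++ [(-1 : Int)])]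
      simp [pvGo, h]

theorem pvFoldB (t : List Int) : ∀ (cm : Int) (acc : List Int),
    (t.foldl
      (fun (st : Int × List Int) v =>
        (if v > st.1 then v else st.1, st.2 ++ [st.1]))
      (cm, acc)).2 = acc ++ pvPref cm t := by
  induction t with
  | nil => intro cm acc; simp [pvPref]
  | cons v t ih =>
    intro cm acc
    simp only [List.foldl_cons]
    rw [ih]
    simp [pvPref]

theorem pvZipPref (t : List Int) : ∀ (cm : Int),
    List.zipWith (fun v p => if v ≤ p then -1 else v) t (pvPref cm t) = pvGo cm t := by
  induction t with
  | nil => intro cm; simp [pvPref, pvGo]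
  | cons v t ih =>
    intro cm
    simp only [pvPref, pvGo, List.zipWith_cons_cons]
    by_cases h : v > cm
    · rw [if_neg (by omega), if_pos h, if_pos h, ih]
    · rw [if_pos (by omega), if_neg h, if_neg h, ih]

-- ===== VERDICT =====
theorem scanToInsertMinusOneLeftToRight_spec : Claim_equal_scanToInsertMinusOneLeftToRight := by
  intro row _
  unfold Spec_scanToInsertMinusOneLeftToRight
  unfold scanToInsertMinusOneLeftToRight scanToInsertMinusOneLeftToRight_alt
  have hA := pvFoldA row (-1) []
  have hB := pvFoldB row (-1) []
  simp only [List.length_nil, Int.natCast_zero, List.nil_append] at hA hB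
  rw [hA, hB, pvZipPref]
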